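-- pv_equiv track=rewrite | github.com/priscila0621/Calculadora-Nexus | qt_app/sistemas/gauss_qt.py | _analizar_rref
-- ===== SOURCE A (Python) =====
-- def _analizar_rref(A):
--     n = len(A)
--     m = len(A[0])
--     num_vars = m - 1
--     piv_col_por_fila = [-1] * n
--     piv_fila_por_col = {}
--     for i in range(n):
--         for j in range(num_vars):
--             if A[i][j] == 1 and all(A[k][j] == 0 for k in range(n) if k != i):
--                 piv_col_por_fila[i] = j
--                 piv_fila_por_col[j] = i
--                 break
--     pivot_cols = [j for j in piv_col_por_fila if j != -1]
--     free_cols = [j for j in range(num_vars) if j not in pivot_cols]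
--     return pivot_cols, free_cols, piv_fila_por_col
-- ===== SOURCE B (Python) =====
-- def _analizar_rref(A):
--     n = len(A)
--     num_vars = len(A[0]) - 1
--     # one pass per column: a column is a pivot (unit) column iff its only
--     # nonzero entry is a single 1; record that row
--     unit = {}  # column -> its pivot row (columns in increasing order)
--     for j in range(num_vars):
--         r = -1
--         ok = True
--         for k in range(n):
--             v = A[k][j]
--             if v != 0:
--                 if r != -1 or v != 1:
--                     ok = False
--                     break
--                 r = k
--         if ok and r != -1:
--             unit[j] = r
--     # first unit column of each row (columns were visited in increasing order)
--     first_col = {}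
--     for j, r in unit.items():
--         if r not in first_col:
--             first_col[r] = j
--     pivot_cols = []
--     piv_fila_por_col = {}
--     for i in range(n):
--         if i in first_col:
--             j = first_col[i]
--             pivot_cols.append(j)
--             piv_fila_por_col[j] = i
--     pivot_set = set(pivot_cols)
--     free_cols = [j for j in range(num_vars) if j not in pivot_set]
--     return pivot_cols, free_cols, piv_fila_por_col
-- ===== Notes on version B (the rewrite author's own statement) =====
-- stated objective: faster
-- what changed: Instead of testing, for every row, each candidate column with an inner scan over all rows (row-major, O(n^2*m)), B makes one column-major pass that classifies each column as a unit column (single nonzero entry equal to 1) with its pivot row, then assigns each row its first unit column and assembles the three outputs in one row loop (O(n*m)).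
-- outside the precondition, e.g. on _analizar_rref([[0, 0, 0], [1]]): A returns ([0], [1], {0: 1}), B raises IndexError
import Mathlib
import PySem

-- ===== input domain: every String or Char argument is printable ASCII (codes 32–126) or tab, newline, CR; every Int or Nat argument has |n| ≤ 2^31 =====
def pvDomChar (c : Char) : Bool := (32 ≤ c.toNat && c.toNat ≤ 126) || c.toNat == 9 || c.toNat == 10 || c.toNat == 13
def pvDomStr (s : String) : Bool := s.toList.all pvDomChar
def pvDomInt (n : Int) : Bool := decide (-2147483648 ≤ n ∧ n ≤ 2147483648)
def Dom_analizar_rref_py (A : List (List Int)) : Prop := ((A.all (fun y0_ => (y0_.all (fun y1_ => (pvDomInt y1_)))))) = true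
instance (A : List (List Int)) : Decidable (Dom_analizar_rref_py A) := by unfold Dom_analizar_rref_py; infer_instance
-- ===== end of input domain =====

-- B replaces A's per-row search (each candidate column re-scanned over all rows) by one
-- column-major pass that classifies unit columns, then assembles the outputs row by row: faster.

-- A[i][j], total form (in range on every input admitted by Pre_); shared by both ports
def pvGetRC (A : List (List Int)) (i j : Nat) : Int := (A.getD i []).getD j 0

-- ===== PORT A =====
-- 'A[i][j] == 1 and all(A[k][j] == 0 for k in range(n) if k != i)'
def pvCondA (A : List (List Int)) (n i j : Nat) : Bool :=
  pvGetRC A i j == 1 && ((List.range n).filter (fun k => k != i)).all (fun k => pvGetRC A k j == 0)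

-- one iteration of A's row loop (find first pivot column of row i, record it)
def pvStepA (A : List (List Int)) (n num_vars : Nat)
    (st : List Int × PySem.Dict Int Int) (i : Nat) : List Int × PySem.Dict Int Int :=
  match (List.range num_vars).find? (fun j => pvCondA A n i j) with
  | some j => (st.1.set i (Int.ofNat j), st.2.insert (Int.ofNat j) (Int.ofNat i))
  | none => st

def analizar_rref_py (A : List (List Int)) : List Int × List Int × (List (Int × Int)) :=
  let n := A.length
  let m := (A.headD []).length
  let num_vars := m - 1
  -- for i in range(n): for j in range(num_vars): if cond: record; break
  let st := (List.range n).foldl (pvStepA A n num_vars)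
    (List.replicate n (-1), PySem.Dict.empty)
  let pivot_cols := st.1.filter (fun j => j != -1)
  let free_cols := ((List.range num_vars).map (fun j => (Int.ofNat j))).filter
      (fun j => !(pivot_cols.contains j))
  (pivot_cols, free_cols, st.2.items)

-- ===== PORT B =====
-- inner loop of B's column scan: r accumulator, break ⇒ none
def pvScanCol (A : List (List Int)) (j : Nat) : List Nat → Int → Option Int
  | [], r => if r != -1 then some r else none
  | k :: ks, r =>
    let v := pvGetRC A k j
    if v != 0 then
      if r != -1 || v != 1 then none
      else pvScanCol A j ks (Int.ofNat k)
    else pvScanCol A j ks r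

-- one iteration of B's column loop (record a unit column)
def pvStepU (A : List (List Int)) (n : Nat)
    (u : PySem.Dict Int Int) (j : Nat) : PySem.Dict Int Int :=
  match pvScanCol A j (List.range n) (-1) with
  | some r => u.insert (Int.ofNat j) r
  | none => u

-- one iteration of B's assembly loop over the rows
def pvStepRow (fc : PySem.Dict Int Int)
    (st : List Int × PySem.Dict Int Int) (i : Nat) : List Int × PySem.Dict Int Int :=
  match fc.get? (Int.ofNat i) with
  | some j => (st.1 ++ [j], st.2.insert j (Int.ofNat i))
  | none => st

def analizar_rref_py_alt (A : List (List Int)) : List Int × List Int × (List (Int × Int)) :=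
  let n := A.length
  let num_vars := (A.headD []).length - 1
  -- one pass per column: unit columns with their pivot row
  let unit := (List.range num_vars).foldl (pvStepU A n) PySem.Dict.empty
  -- first unit column of each row
  let first_col := unit.items.foldl
    (fun (fc : PySem.Dict Int Int) p =>
      if fc.contains p.2 then fc else fc.insert p.2 p.1)
    PySem.Dict.empty
  -- assemble per row
  let st := (List.range n).foldl (pvStepRow first_col) ([], PySem.Dict.empty)
  let pivot_set := PySem.Set.ofList st.1
  let free_cols := ((List.range num_vars).map (fun j => (Int.ofNat j))).filter
      (fun j => !(pivot_set.contains j))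
  (st.1, free_cols, st.2.items)

-- ===== PRECONDITION & SPEC =====
-- Pre_ excludes the inputs on which the Python A raises IndexError ([] has no A[0]; a row
-- shorter than num_vars can be indexed out of range) plus the ragged inputs on which A happens
-- to return only because early breaks / short-circuits skip the short row, where B's full
-- column scan raises instead.
def Pre_analizar_rref_py (A : List (List Int)) : Prop :=
  A ≠ [] ∧ ∀ row ∈ A, (A.headD []).length - 1 ≤ row.length
instance (A : List (List Int)) : Decidable (Pre_analizar_rref_py A) := by
  unfold Pre_analizar_rref_py; infer_instance

def pvWitness_analizar_rref_py : List (List Int) := [[1, 0, 3], [0, 1, 4]]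

def Spec_analizar_rref_py (A : List (List Int)) (out : List Int × List Int × (List (Int × Int))) : Prop := out = analizar_rref_py_alt A
instance (A : List (List Int)) (out : List Int × List Int × (List (Int × Int))) : Decidable (Spec_analizar_rref_py A out) := by unfold Spec_analizar_rref_py; infer_instance

-- ===== CLAIM (what is proved, stated in full; the proofs are below) =====
def Claim_equal_analizar_rref_py : Prop := ∀ (A : List (List Int)), Dom_analizar_rref_py A → Pre_analizar_rref_py A → Spec_analizar_rref_py A (analizar_rref_py A)

-- ===== LEMMAS AND PROOFS =====

-- abbreviations used only by the proofs
def pvN (A : List (List Int)) : Nat := A.length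
def pvNV (A : List (List Int)) : Nat := (A.headD []).length - 1
-- A's per-row first pivot column
def pvF (A : List (List Int)) (i : Nat) : Option Nat :=
  (List.range (pvNV A)).find? (fun j => pvCondA A (pvN A) i j)
-- B's per-column scan result
def pvU (A : List (List Int)) (j : Nat) : Option Int :=
  pvScanCol A j (List.range (pvN A)) (-1)

-- B's per-row pivot column as an Int option
def pvG (A : List (List Int)) (i : Nat) : Option Int := (pvF A i).map Int.ofNat
-- the unit-column property of column j with pivot row i
def pvPiv (A : List (List Int)) (i j : Nat) : Prop :=
  pvGetRC A i j = 1 ∧ ∀ k < pvN A, k ≠ i → pvGetRC A k j = 0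
-- the two accumulator updates both loops share, named so folds can be split
def pvStepSet (A : List (List Int)) (l : List Int) (i : Nat) : List Int :=
  match pvG A i with | some j => l.set i j | none => l
def pvStepIns (A : List (List Int)) (d : PySem.Dict Int Int) (i : Nat) : PySem.Dict Int Int :=
  match pvG A i with | some j => d.insert j (Int.ofNat i) | none => d
def pvStepApp (A : List (List Int)) (l : List Int) (i : Nat) : List Int :=
  match pvG A i with | some j => l ++ [j] | none => l
def pvStepRowG (A : List (List Int))
    (st : List Int × PySem.Dict Int Int) (i : Nat) : List Int × PySem.Dict Int Int :=
  match pvG A i with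
  | some j => (st.1 ++ [j], st.2.insert j (Int.ofNat i))
  | none => st

-- ---- small generic list lemmas ----
theorem pv_find?_congr {α : Type} (p q : α → Bool) :
    ∀ (l : List α), (∀ x ∈ l, p x = q x) → l.find? p = l.find? q := by
  intro l
  induction l with
  | nil => intro _; rfl
  | cons a t ih =>
    intro h
    have ha := h a (List.mem_cons_self)
    by_cases hp : p a = true
    · simp [List.find?_cons, hp, ha ▸ hp]
    · have hq : q a = false := by rw [← ha]; simpa using hp
      have hp' : p a = false := by simpa using hp
      simp [List.find?_cons, hp', hq]
      exact ih (fun x hx => h x (List.mem_cons_of_mem _ hx))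

theorem pv_find?_filterMap {α β : Type} (g : α → Option β) (q : β → Bool) :
    ∀ (l : List α),
      (l.filterMap g).find? q
        = ((l.find? (fun a => ((g a).map q).getD false)).bind g) := by
  intro l
  induction l with
  | nil => rfl
  | cons a t ih =>
    cases hg : g a with
    | none => simp [List.filterMap_cons, hg, List.find?_cons, ih]
    | some b =>
      by_cases hq : q b = true
      · simp [List.filterMap_cons, hg, List.find?_cons, hq]
      · have hq' : q b = false := by simpa using hq
        simp [List.filterMap_cons, hg, List.find?_cons, hq', ih]

theorem pv_set_append_len (j : Int) :
    ∀ (M : List Int) (n : Nat) (t : List Int), M.length = n →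
      (M ++ t).set n j = M ++ t.set 0 j := by
  intro M
  induction M with
  | nil => intro n t h; subst h; simp
  | cons a m ih =>
    intro n t h
    subst h
    simp only [List.cons_append, List.length_cons, List.set_cons_succ]
    rw [ih m.length t rfl]

-- the '[-1]*n then assign slot i' loop is a map over range n
theorem pv_foldl_set_range (g : Nat → Option Int) :
    ∀ (n : Nat) (l : List Int), n ≤ l.length →
      (List.range n).foldl
          (fun acc i => match g i with | some j => acc.set i j | none => acc) l
        = (List.range n).map
            (fun i => match g i with | some j => j | none => l.getD i 0) ++ l.drop n := by
  intro n
  induction n with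
  | zero => intro l _; simp
  | succ n ih =>
    intro l h
    have hn : n < l.length := h
    have hd : l.drop n = l[n] :: l.drop (n + 1) := List.drop_eq_getElem_cons hn
    have hgd : l.getD n 0 = l[n] := List.getD_eq_getElem l 0 hn
    rw [List.range_succ, List.foldl_append, List.map_append,
        ih l (Nat.le_of_lt hn)]
    cases hg : g n with
    | none =>
      simp only [List.foldl_cons, List.foldl_nil, hg, List.map_cons, List.map_nil]
      rw [hd, hgd]
      simp
    | some j =>
      simp only [List.foldl_cons, List.foldl_nil, hg, List.map_cons, List.map_nil]
      have hlen : ((List.range n).map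
          (fun i => match g i with | some j => j | none => l.getD i 0)).length = n := by
        simp
      rw [pv_set_append_len j _ n (l.drop n) hlen, hd, List.set_cons_zero]
      simp

-- 'if value-key not seen yet, insert' keeps the FIRST pair with each value
theorem pv_get?_foldl_firstwins (x : Int) :
    ∀ (ps : List (Int × Int)) (d : PySem.Dict Int Int),
      PySem.Dict.get?
          (ps.foldl
            (fun fc p => if fc.contains p.2 then fc else fc.insert p.2 p.1) d) x
        = (d.get? x).or ((ps.find? (fun p => p.2 == x)).map (fun p => p.1)) := by
  intro ps
  induction ps with
  | nil => intro d; simp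
  | cons p t ih =>
    intro d
    by_cases hc : d.contains p.2 = true
    · by_cases hx : p.2 = x
      · have : (d.get? x).isSome := by
          rw [← hx]; rw [PySem.Dict.contains_eq_isSome_get?] at hc; exact hc
        cases hg : d.get? x with
        | none => rw [hg] at this; simp at this
        | some v => simp [List.foldl_cons, hc, ih, hg]
      · simp [List.foldl_cons, hc, ih, List.find?_cons, hx]
    · have hc' : d.contains p.2 = false := by simpa using hc
      by_cases hx : p.2 = x
      · subst hx
        have hg : d.get? p.2 = none := by
          rw [PySem.Dict.contains_eq_isSome_get?] at hc'
          exact Option.not_isSome_iff_eq_none.mp (by simp [hc'])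
        simp [List.foldl_cons, hc', ih, List.find?_cons,
              PySem.Dict.get?_insert, hg]
      · simp [List.foldl_cons, hc', ih, List.find?_cons, hx,
              PySem.Dict.get?_insert, Ne.symm hx]

-- filter-then-map over the isSome rows is a filterMap
theorem pv_filter_isSome_map {γ : Type} (g : Nat → Option Int) (h : Nat → Int → γ) :
    ∀ (l : List Nat),
      ((l.filter (fun i => (g i).isSome)).map (fun i => h i ((g i).getD 0)))
        = l.filterMap (fun i => (g i).map (fun j => h i j)) := by
  intro l
  induction l with
  | nil => rfl
  | cons a t ih =>
    cases hg : g a with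
    | none => simp [List.filter_cons, hg, List.filterMap_cons, ih]
    | some j => simp [List.filter_cons, hg, List.filterMap_cons, ih]

-- drop the -1 sentinels of the per-row list
theorem pv_filter_ne_neg_one (g : Nat → Option Int) (hg : ∀ i j, g i = some j → j ≠ -1) :
    ∀ (l : List Nat),
      ((l.map (fun i => match g i with | some j => j | none => (-1 : Int))).filter
          (fun x => x != -1))
        = l.filterMap g := by
  intro l
  induction l with
  | nil => rfl
  | cons a t ih =>
    cases hga : g a with
    | none => simp [List.filter_cons, hga, List.filterMap_cons, ih]
    | some j =>
      have : (j != -1) = true := by simpa using hg a j hga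
      simp [List.filter_cons, hga, List.filterMap_cons, ih, this]

-- ---- column-scan characterization ----
theorem pv_scan_acc (A : List (List Int)) (j : Nat) :
    ∀ (ks : List Nat) (r : Int), r ≠ -1 →
      pvScanCol A j ks r
        = if ks.all (fun k => pvGetRC A k j == 0) then some r else none := by
  intro ks
  induction ks with
  | nil => intro r hr; simp [pvScanCol, hr]
  | cons k t ih =>
    intro r hr
    by_cases hv : pvGetRC A k j = 0
    · simp [pvScanCol, hv, ih r hr]
    · simp [pvScanCol, hv, hr]

theorem pv_scan_char (A : List (List Int)) (j : Nat) :
    ∀ (ks : List Nat),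
      pvScanCol A j ks (-1)
        = (match ks.filter (fun k => pvGetRC A k j != 0) with
           | [k] => if pvGetRC A k j == 1 then some (Int.ofNat k) else none
           | _ => none) := by
  intro ks
  induction ks with
  | nil => simp [pvScanCol]
  | cons k t ih =>
    by_cases hv : pvGetRC A k j = 0
    · simp [pvScanCol, hv, List.filter_cons, ih]
    · by_cases h1 : pvGetRC A k j = 1
      · have hk : (Int.ofNat k) ≠ -1 := by simp only [Int.ofNat_eq_natCast]; omega
        rw [show pvScanCol A j (k :: t) (-1) = pvScanCol A j t (Int.ofNat k) by
              simp [pvScanCol, hv, h1]]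
        rw [pv_scan_acc A j t (Int.ofNat k) hk]
        cases hf : t.filter (fun k => pvGetRC A k j != 0) with
        | nil =>
          have hall : t.all (fun k => pvGetRC A k j == 0) = true := by
            rw [List.all_eq_true]
            intro x hx
            have := List.filter_eq_nil_iff.mp hf x hx
            simpa using this
          simp [List.filter_cons, hv, hf, hall, h1]
        | cons y ys =>
          have hy : y ∈ t.filter (fun k => pvGetRC A k j != 0) := by
            rw [hf]; exact List.mem_cons_self
          have hyt : y ∈ t ∧ pvGetRC A y j ≠ 0 := by
            have := List.mem_filter.mp hy
            exact ⟨this.1, by simpa using this.2⟩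
          have hall : t.all (fun k => pvGetRC A k j == 0) = false := by
            rw [List.all_eq_false]
            exact ⟨y, hyt.1, by simpa using hyt.2⟩
          simp [List.filter_cons, hv, hf, hall]
      · have hnone : pvScanCol A j (k :: t) (-1) = none := by
          simp [pvScanCol, hv, h1]
        rw [hnone, List.filter_cons]
        have hv' : (pvGetRC A k j != 0) = true := by simpa using hv
        simp only [hv', if_true]
        cases hf : t.filter (fun k => pvGetRC A k j != 0) <;> simp [h1]

-- ---- pivot characterizations ----
theorem pv_condA_iff (A : List (List Int)) (i j : Nat) :
    pvCondA A (pvN A) i j = true ↔ pvPiv A i j := by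
  unfold pvCondA pvPiv
  simp only [Bool.and_eq_true, beq_iff_eq, List.all_eq_true, List.mem_filter,
             List.mem_range, bne_iff_ne, ne_eq, pvN]
  constructor
  · rintro ⟨h1, h2⟩
    exact ⟨h1, fun k hk hne => h2 k ⟨hk, hne⟩⟩
  · rintro ⟨h1, h2⟩
    exact ⟨h1, fun k hk => h2 k hk.1 hk.2⟩

theorem pv_piv_unique (A : List (List Int)) (i i' j : Nat)
    (h : pvPiv A i j) (h' : pvPiv A i' j) (hi : i < pvN A) (hi' : i' < pvN A) :
    i = i' := by
  by_contra hne
  have h0 : pvGetRC A i' j = 0 := h.2 i' hi' (fun e => hne e.symm)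
  have h1 : pvGetRC A i' j = 1 := h'.1
  omega

theorem pvU_eq (A : List (List Int)) (i j : Nat) (hi : i < pvN A) :
    pvU A j = some (Int.ofNat i) ↔ pvPiv A i j := by
  unfold pvU
  rw [pv_scan_char]
  constructor
  · intro h
    cases hf : (List.range (pvN A)).filter (fun k => pvGetRC A k j != 0) with
    | nil => rw [hf] at h; simp at h
    | cons k ks =>
      cases ks with
      | cons y ys => rw [hf] at h; simp at h
      | nil =>
        rw [hf] at h
        by_cases h1 : pvGetRC A k j = 1
        · have hki : k = i := by
            simp [h1] at h
            omega
          subst hki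
          refine ⟨h1, fun k' hk' hne => ?_⟩
          by_contra hnz
          have : k' ∈ (List.range (pvN A)).filter (fun k => pvGetRC A k j != 0) := by
            rw [List.mem_filter]
            exact ⟨List.mem_range.mpr hk', by simpa using hnz⟩
          rw [hf] at this
          simp at this
          exact hne this
        · simp [h1] at h
  · intro hp
    have hfe : (List.range (pvN A)).filter (fun k => pvGetRC A k j != 0)
        = (List.range (pvN A)).filter (fun k => k == i) := by
      apply List.filter_congr
      intro x hx
      have hx' := List.mem_range.mp hx
      by_cases hxi : x = i
      · subst hxi
        have := hp.1
        simp [this]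
      · have := hp.2 x hx' hxi
        simp [this, hxi]
    rw [hfe, List.filter_beq,
        List.count_eq_one_of_mem (List.nodup_range) (List.mem_range.mpr hi)]
    simp [hp.1]

theorem pvU_some (A : List (List Int)) (j : Nat) (x : Int) (h : pvU A j = some x) :
    ∃ i, i < pvN A ∧ x = Int.ofNat i ∧ pvPiv A i j := by
  unfold pvU at h
  rw [pv_scan_char] at h
  cases hf : (List.range (pvN A)).filter (fun k => pvGetRC A k j != 0) with
  | nil => rw [hf] at h; simp at h
  | cons k ks =>
    cases ks with
    | cons y ys => rw [hf] at h; simp at h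
    | nil =>
      rw [hf] at h
      by_cases h1 : pvGetRC A k j = 1
      · have hk : k ∈ (List.range (pvN A)).filter (fun k => pvGetRC A k j != 0) := by
          rw [hf]; exact List.mem_cons_self
        have hkn : k < pvN A := List.mem_range.mp (List.mem_filter.mp hk).1
        refine ⟨k, hkn, ?_, (pvU_eq A k j hkn).mp ?_⟩
        · simp [h1] at h
          first
          | exact h.symm
          | exact h
        · unfold pvU
          rw [pv_scan_char, hf]
          simp [h1]
      · simp [h1] at h

theorem pvF_unique (A : List (List Int)) (i i' j : Nat)
    (h : pvF A i = some j) (h' : pvF A i' = some j)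
    (hi : i < pvN A) (hi' : i' < pvN A) : i = i' := by
  have c : pvCondA A (pvN A) i j = true := List.find?_some h
  have c' : pvCondA A (pvN A) i' j = true := List.find?_some h'
  exact pv_piv_unique A i i' j ((pv_condA_iff A i j).mp c) ((pv_condA_iff A i' j).mp c') hi hi'

-- ---- fold assembly ----
-- A's nested loop, split into its two accumulators
theorem pv_foldA (A : List (List Int)) :
    (List.range (pvN A)).foldl (pvStepA A (pvN A) (pvNV A))
        (List.replicate (pvN A) (-1), PySem.Dict.empty)
      = ((List.range (pvN A)).foldl (pvStepSet A) (List.replicate (pvN A) (-1)),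
         (List.range (pvN A)).foldl (pvStepIns A) PySem.Dict.empty) := by
  have hstep : pvStepA A (pvN A) (pvNV A)
      = (fun (st : List Int × PySem.Dict Int Int) i =>
          (pvStepSet A st.1 i, pvStepIns A st.2 i)) := by
    funext st i
    unfold pvStepA pvStepSet pvStepIns pvG pvF
    cases h : (List.range (pvNV A)).find? (fun j => pvCondA A (pvN A) i j) <;> simp [h]
  rw [hstep, PySem.List.foldl_prod_mk]

-- the slot-assignment loop is a map over the rows
theorem pv_fst_map (A : List (List Int)) :
    (List.range (pvN A)).foldl (pvStepSet A) (List.replicate (pvN A) (-1))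
      = (List.range (pvN A)).map
          (fun i => match pvG A i with | some j => j | none => (-1 : Int)) := by
  unfold pvStepSet
  rw [pv_foldl_set_range (pvG A) (pvN A) (List.replicate (pvN A) (-1)) (by simp)]
  have hdrop : (List.replicate (pvN A) (-1 : Int)).drop (pvN A) = [] := by
    simp
  rw [hdrop, List.append_nil]
  apply List.map_congr_left
  intro i hi
  have hi' := List.mem_range.mp hi
  cases h : pvG A i with
  | none => simp [List.getElem?_replicate, hi']
  | some j => rfl

theorem pv_G_ne_neg_one (A : List (List Int)) (i : Nat) (j : Int) (h : pvG A i = some j) :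
    j ≠ -1 := by
  unfold pvG at h
  cases hf : pvF A i with
  | none => rw [hf] at h; exact absurd h (by simp)
  | some j0 =>
    rw [hf] at h
    have hj : j = Int.ofNat j0 := by simpa using h.symm
    subst hj
    simp only [Int.ofNat_eq_natCast]
    omega

-- A's dict loop: items
theorem pv_dict_items (A : List (List Int)) :
    ((List.range (pvN A)).foldl (pvStepIns A) PySem.Dict.empty).items
      = (List.range (pvN A)).filterMap
          (fun i => (pvG A i).map (fun j => (j, Int.ofNat i))) := by
  have hstep : pvStepIns A
      = (fun d i => if (pvG A i).isSome
          then d.insert ((pvG A i).getD 0) (Int.ofNat i) else d) := by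
    funext d i
    unfold pvStepIns
    cases h : pvG A i <;> simp [h]
  rw [hstep, PySem.List.foldl_if_eq_foldl_filter]
  have hnodup : (((List.range (pvN A)).filter (fun i => (pvG A i).isSome)).map
      (fun i => (pvG A i).getD 0)).Nodup := by
    apply List.Nodup.map_on
    · intro a ha b hb hab
      have ha' := List.mem_filter.mp ha
      have hb' := List.mem_filter.mp hb
      obtain ⟨ja, hja⟩ := Option.isSome_iff_exists.mp (by simpa using ha'.2)
      obtain ⟨jb, hjb⟩ := Option.isSome_iff_exists.mp (by simpa using hb'.2)
      rw [hja, hjb] at hab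
      simp at hab
      subst hab
      unfold pvG at hja hjb
      cases hfa : pvF A a with
      | none => rw [hfa] at hja; simp at hja
      | some j0 =>
        cases hfb : pvF A b with
        | none => rw [hfb] at hjb; simp at hjb
        | some j1 =>
          rw [hfa] at hja; rw [hfb] at hjb
          simp at hja hjb
          have : j0 = j1 := by
            have h2 := hja.trans hjb.symm
            simpa using h2
          subst this
          exact pvF_unique A a b j0 hfa hfb
            (List.mem_range.mp ha'.1) (List.mem_range.mp hb'.1)
    · exact (List.nodup_range).filter _
  rw [PySem.Dict.items_foldl_insert_fresh
        (l := (List.range (pvN A)).filter (fun i => (pvG A i).isSome))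
        (k := fun i => (pvG A i).getD 0) (v := fun i => Int.ofNat i)
        (d := PySem.Dict.empty)
        (by intro a _; simp) hnodup]
  rw [show (PySem.Dict.empty : PySem.Dict Int Int).items = [] from rfl, List.nil_append]
  exact pv_filter_isSome_map (pvG A) (fun i j => (j, Int.ofNat i)) (List.range (pvN A))

-- B's unit-column loop: items
theorem pv_unit_items (A : List (List Int)) :
    ((List.range (pvNV A)).foldl (pvStepU A (pvN A)) PySem.Dict.empty).items
      = (List.range (pvNV A)).filterMap
          (fun j => (pvU A j).map (fun r => (Int.ofNat j, r))) := by
  have hstep : pvStepU A (pvN A)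
      = (fun u j => if (pvU A j).isSome
          then u.insert (Int.ofNat j) ((pvU A j).getD 0) else u) := by
    funext u j
    unfold pvStepU
    show (match pvU A j with
          | some r => u.insert (Int.ofNat j) r
          | none => u) = _
    cases h : pvU A j <;> simp [h]
  rw [hstep, PySem.List.foldl_if_eq_foldl_filter]
  have hnodup : (((List.range (pvNV A)).filter (fun j => (pvU A j).isSome)).map
      (fun j => (Int.ofNat j : Int))).Nodup := by
    apply List.Nodup.map_on
    · intro a _ b _ hab
      simpa using hab
    · exact (List.nodup_range).filter _
  rw [PySem.Dict.items_foldl_insert_fresh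
        (l := (List.range (pvNV A)).filter (fun j => (pvU A j).isSome))
        (k := fun j => (Int.ofNat j : Int)) (v := fun j => (pvU A j).getD 0)
        (d := PySem.Dict.empty)
        (by intro a _; simp) hnodup]
  rw [show (PySem.Dict.empty : PySem.Dict Int Int).items = [] from rfl, List.nil_append]
  exact pv_filter_isSome_map (pvU A) (fun j r => (Int.ofNat j, r)) (List.range (pvNV A))

-- the first_col lookup computes A's per-row first pivot column
theorem pv_fc_get (A : List (List Int)) (i : Nat) (hi : i < pvN A) :
    PySem.Dict.get?
        (((List.range (pvNV A)).filterMap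
            (fun j => (pvU A j).map (fun r => (Int.ofNat j, r)))).foldl
          (fun (fc : PySem.Dict Int Int) p =>
            if fc.contains p.2 then fc else fc.insert p.2 p.1)
          PySem.Dict.empty)
        (Int.ofNat i)
      = pvG A i := by
  rw [pv_get?_foldl_firstwins]
  rw [PySem.Dict.get?_empty]
  rw [Option.none_or]
  rw [pv_find?_filterMap]
  have hpred : ∀ j ∈ List.range (pvNV A),
      (((pvU A j).map (fun r => ((Int.ofNat j : Int), r))).map
          (fun p => p.2 == Int.ofNat i)).getD false
        = pvCondA A (pvN A) i j := by
    intro j _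
    cases hU : pvU A j with
    | none =>
      simp only [hU, Option.map_none, Option.getD_none]
      cases hc : pvCondA A (pvN A) i j
      · rfl
      · exfalso
        have := (pvU_eq A i j hi).mpr ((pv_condA_iff A i j).mp hc)
        rw [hU] at this
        simp at this
    | some r =>
      simp only [hU, Option.map_some, Option.getD_some]
      obtain ⟨i0, hi0, hr, hpiv⟩ := pvU_some A j r hU
      by_cases hii : i0 = i
      · subst hii
        have hc : pvCondA A (pvN A) i0 j = true := (pv_condA_iff A i0 j).mpr hpiv
        simp [hc, hr]
      · have hc : pvCondA A (pvN A) i j = false := by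
          cases hc : pvCondA A (pvN A) i j
          · rfl
          · exfalso
            exact hii (pv_piv_unique A i i0 j ((pv_condA_iff A i j).mp hc) hpiv hi hi0).symm
        rw [hc, hr]
        simp only [beq_eq_false_iff_ne, ne_eq, Int.ofNat_eq_natCast]
        omega
  rw [pv_find?_congr _ _ _ hpred]
  show ((pvF A i).bind fun j => (pvU A j).map fun r => ((Int.ofNat j : Int), r)).map Prod.fst = pvG A i
  cases hF : pvF A i with
  | none => simp [pvG, hF]
  | some j =>
    have hc : pvCondA A (pvN A) i j = true := List.find?_some hF
    have hU : pvU A j = some (Int.ofNat i) :=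
      (pvU_eq A i j hi).mpr ((pv_condA_iff A i j).mp hc)
    simp [pvG, hF, hU]

-- B's assembly loop, rewritten through the lookup and split
theorem pv_B_fold (A : List (List Int)) :
    (List.range (pvN A)).foldl
        (pvStepRow
          (((List.range (pvNV A)).filterMap
              (fun j => (pvU A j).map (fun r => (Int.ofNat j, r)))).foldl
            (fun (fc : PySem.Dict Int Int) p =>
              if fc.contains p.2 then fc else fc.insert p.2 p.1)
            PySem.Dict.empty))
        ([], PySem.Dict.empty)
      = ((List.range (pvN A)).filterMap (pvG A),
         (List.range (pvN A)).foldl (pvStepIns A) PySem.Dict.empty) := by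
  have hcongr := PySem.List.foldl_congr_mem (List.range (pvN A))
      (pvStepRow
        (((List.range (pvNV A)).filterMap
            (fun j => (pvU A j).map (fun r => (Int.ofNat j, r)))).foldl
          (fun (fc : PySem.Dict Int Int) p =>
            if fc.contains p.2 then fc else fc.insert p.2 p.1)
          PySem.Dict.empty))
      (pvStepRowG A) ([], PySem.Dict.empty)
      (fun st i hi => by
        unfold pvStepRow pvStepRowG
        rw [pv_fc_get A i (List.mem_range.mp hi)])
  rw [hcongr]
  have hstep : pvStepRowG A
      = (fun (st : List Int × PySem.Dict Int Int) i =>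
          (pvStepApp A st.1 i, pvStepIns A st.2 i)) := by
    funext st i
    unfold pvStepRowG pvStepApp pvStepIns
    cases h : pvG A i <;> simp [h]
  rw [hstep, PySem.List.foldl_prod_mk]
  congr 1
  have hstep1 : pvStepApp A
      = (fun l i => if (pvG A i).isSome then l ++ [(pvG A i).getD 0] else l) := by
    funext l i
    unfold pvStepApp
    cases h : pvG A i <;> simp [h]
  rw [hstep1, PySem.List.foldl_append_if, List.nil_append]
  rw [pv_filter_isSome_map (pvG A) (fun _ j => j) (List.range (pvN A))]
  simp

theorem pv_contains_ofList (L : List Int) (x : Int) :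
    (PySem.Set.ofList L).contains x = L.contains x := by
  by_cases h : x ∈ L
  · have h1 : x ∈ PySem.Set.ofList L := by rw [PySem.Set.mem_ofList]; exact h
    simp [h, h1]
  · have h1 : x ∉ PySem.Set.ofList L := by rw [PySem.Set.mem_ofList]; exact h
    simp [h, h1]

-- projection forms used by the final assembly
theorem pv_foldA_fst (A : List (List Int)) :
    ((List.range (pvN A)).foldl (pvStepA A (pvN A) (pvNV A))
        (List.replicate (pvN A) (-1), PySem.Dict.empty)).1
      = (List.range (pvN A)).foldl (pvStepSet A) (List.replicate (pvN A) (-1)) := by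
  rw [pv_foldA]

theorem pv_foldA_snd (A : List (List Int)) :
    ((List.range (pvN A)).foldl (pvStepA A (pvN A) (pvNV A))
        (List.replicate (pvN A) (-1), PySem.Dict.empty)).2
      = (List.range (pvN A)).foldl (pvStepIns A) PySem.Dict.empty := by
  rw [pv_foldA]

theorem pv_B_fold_fst (A : List (List Int)) :
    ((List.range (pvN A)).foldl
        (pvStepRow
          (((List.range (pvNV A)).filterMap
              (fun j => (pvU A j).map (fun r => (Int.ofNat j, r)))).foldl
            (fun (fc : PySem.Dict Int Int) p =>
              if fc.contains p.2 then fc else fc.insert p.2 p.1)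
            PySem.Dict.empty))
        ([], PySem.Dict.empty)).1
      = (List.range (pvN A)).filterMap (pvG A) := by
  rw [pv_B_fold]

theorem pv_B_fold_snd (A : List (List Int)) :
    ((List.range (pvN A)).foldl
        (pvStepRow
          (((List.range (pvNV A)).filterMap
              (fun j => (pvU A j).map (fun r => (Int.ofNat j, r)))).foldl
            (fun (fc : PySem.Dict Int Int) p =>
              if fc.contains p.2 then fc else fc.insert p.2 p.1)
            PySem.Dict.empty))
        ([], PySem.Dict.empty)).2
      = (List.range (pvN A)).foldl (pvStepIns A) PySem.Dict.empty := by
  rw [pv_B_fold]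

-- the two ports agree on EVERY input (through the totalized indexing pvGetRC)
theorem pv_main (A : List (List Int)) :
    analizar_rref_py A = analizar_rref_py_alt A := by
  simp only [analizar_rref_py, analizar_rref_py_alt]
  rw [show A.length = pvN A from rfl,
      show (A.headD []).length - 1 = pvNV A from rfl]
  rw [pv_unit_items]
  rw [pv_foldA_fst, pv_foldA_snd, pv_B_fold_fst, pv_B_fold_snd]
  rw [pv_fst_map]
  rw [pv_filter_ne_neg_one (pvG A) (pv_G_ne_neg_one A) (List.range (pvN A))]
  rw [pv_dict_items]
  have hset : (fun j => !((PySem.Set.ofList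
        ((List.range (pvN A)).filterMap (pvG A))).contains j))
      = (fun j => !(((List.range (pvN A)).filterMap (pvG A)).contains j)) := by
    funext j
    rw [pv_contains_ofList]
  rw [hset]

-- ===== VERDICT (by name: the statement is the Claim_ definition above) =====
theorem analizar_rref_py_spec : Claim_equal_analizar_rref_py := by
  intro A _ _
  unfold Spec_analizar_rref_py
  exact pv_main A
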